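-- pv_equiv track=rewrite | github.com/bardulah/tennis-prediction-system | telegram-agent/adk-agent/demo_player_matching.py | demo_expand_player_name
-- ===== SOURCE A (Python) =====
-- from typing import List, Dict
--
-- def demo_find_players_by_name(search_name: str, mock_database: List[str], max_results: int = 5) -> List[Dict[str, str]]:
--     """
--     Demo version of find_players_by_name with mock database.
--     """
--     search_name = search_name.strip().title()
--     matches = []
--
--     # Strategy 1: Exact match
--     for player in mock_database:
--         if player.lower() == search_name.lower():
--             matches.append({"full_name": player, "match_type": "exact"})
--
--     # Strategy 2: Surname match (if search name is likely a surname)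
--     if len(search_name.split()) == 1:
--         for player in mock_database:
--             player_surname = player.split()[-1]  # Get last word
--             if player_surname.lower() == search_name.lower():
--                 matches.append({"full_name": player, "match_type": "surname"})
--
--     # Strategy 3: Partial name match
--     for player in mock_database:
--         if search_name.lower() in player.lower():
--             matches.append({"full_name": player, "match_type": "partial"})
--
--     # Remove duplicates
--     unique_matches = []
--     seen_names = set()
--     for match in matches:
--         if match["full_name"] not in seen_names:
--             unique_matches.append(match)
--             seen_names.add(match["full_name"])
--             if len(unique_matches) >= max_results:
--                 break
--
--     return unique_matches
--
-- def demo_expand_player_name(player_input: str, mock_database: List[str]) -> List[str]: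
--     """Demo version of expand_player_name."""
--     player_input = player_input.strip()
--
--     # First try exact match
--     exact_matches = demo_find_players_by_name(player_input, mock_database, max_results=1)
--     if exact_matches and exact_matches[0]["match_type"] == "exact":
--         return [exact_matches[0]["full_name"]]
--
--     # If no exact match, find all potential matches
--     all_matches = demo_find_players_by_name(player_input, mock_database, max_results=10)
--
--     if not all_matches:
--         return []
--
--     # If only one match, return it
--     if len(all_matches) == 1:
--         return [all_matches[0]["full_name"]]
--
--     # Multiple matches - return all of them
--     return [match["full_name"] for match in all_matches]
-- ===== SOURCE B (Python) =====
-- def demo_expand_player_name(player_input, mock_database):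
--     """Expand a player name via exact/surname/partial matching (single-pass rewrite)."""
--     s = player_input.strip().title()
--     sl = s.lower()
--     # An exact match always wins and is returned alone.
--     for player in mock_database:
--         if player.lower() == sl:
--             return [player]
--     # Otherwise gather surname matches (single-word input only), then partial matches.
--     candidates = []
--     if len(s.split()) == 1:
--         candidates.extend(p for p in mock_database if p.split()[-1].lower() == sl)
--     candidates.extend(p for p in mock_database if sl in p.lower())
--     # Dedup keeping first occurrence, capped at 10.
--     result = []
--     for name in candidates:
--         if name not in result and len(result) < 10:
--             result.append(name)
--     return result
-- ===== Notes on version B (the rewrite author's own statement) =====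
-- stated objective: simpler
-- what changed: B inlines the two demo_find_players_by_name calls into one pass: it returns the first exact match immediately (no dict records, no cap-1 dedup of the full match list) and only otherwise builds the surname/partial candidate list and dedups it with a cap of 10, exploiting that A's len==1 and multi-match branches coincide.
import Mathlib
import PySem

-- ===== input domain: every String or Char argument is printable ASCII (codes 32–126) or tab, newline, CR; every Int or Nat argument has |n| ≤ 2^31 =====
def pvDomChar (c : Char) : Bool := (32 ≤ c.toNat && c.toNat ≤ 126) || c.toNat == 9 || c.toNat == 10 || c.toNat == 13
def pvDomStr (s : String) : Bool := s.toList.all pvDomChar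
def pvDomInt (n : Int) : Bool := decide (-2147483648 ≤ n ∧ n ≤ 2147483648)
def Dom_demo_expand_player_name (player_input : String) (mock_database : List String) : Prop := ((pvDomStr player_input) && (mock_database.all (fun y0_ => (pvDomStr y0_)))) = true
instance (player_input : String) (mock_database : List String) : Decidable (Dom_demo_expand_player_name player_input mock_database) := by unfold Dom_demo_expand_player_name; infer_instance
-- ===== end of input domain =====

-- B inlines A's double helper call into one pass: return the first exact match immediately,
-- otherwise dedup-and-cap the surname/partial candidate names directly (objective: simpler).
-- Return-value equivalence only; neither program mutates its arguments.

-- hand port of Python str.title() (no PySem primitive): uppercase a letter after a non-letter,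
-- lowercase a letter after a letter; exact on the ASCII domain (where cased = ASCII letter)
def pyTitleChars : List Char → Bool → List Char
  | [], _ => []
  | c :: rest, prevAlpha =>
    if PySem.Chars.isalpha c then
      (if prevAlpha then PySem.Chars.lowerChar c else PySem.Chars.upperChar c) :: pyTitleChars rest true
    else c :: pyTitleChars rest false

def pyTitle (s : String) : String := String.ofList (pyTitleChars s.toList false)

-- ===== PORT A =====
def demo_find_players_by_name (search_name : String) (mock_database : List String) (max_results : Int) : List (String × String) :=
  let search_name := pyTitle (PySem.Str.strip search_name)
  -- Strategy 1: exact match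
  let matches1 := mock_database.foldl (fun acc player =>
      if PySem.Str.lower player == PySem.Str.lower search_name then acc ++ [(player, "exact")] else acc) []
  -- Strategy 2: surname match
  let matches2 :=
    if (PySem.Str.split₀ search_name).length == 1 then
      mock_database.foldl (fun acc player =>
        -- player.split()[-1]: pyGet? is none (Python: IndexError) on an all-whitespace player — excluded by Pre_
        let player_surname := (PySem.List.pyGet? (PySem.Str.split₀ player) (-1)).getD ""
        if PySem.Str.lower player_surname == PySem.Str.lower search_name then acc ++ [(player, "surname")] else acc) matches1
    else matches1
  -- Strategy 3: partial match
  let matches3 := mock_database.foldl (fun acc player =>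
      if PySem.Str.isIn (PySem.Str.lower search_name) (PySem.Str.lower player) then acc ++ [(player, "partial")] else acc) matches2
  -- Remove duplicates (the Bool component is the 'break' flag of the Python loop)
  (matches3.foldl (fun (st : List (String × String) × PySem.Set String × Bool) m =>
      if st.2.2 then st
      else if !(PySem.Set.contains st.2.1 m.1) then
        let u := st.1 ++ [m]
        (u, PySem.Set.add st.2.1 m.1, decide (max_results ≤ (u.length : Int)))
      else st) ([], PySem.Set.empty, false)).1

def demo_expand_player_name (player_input : String) (mock_database : List String) : List String :=
  let player_input := PySem.Str.strip player_input
  let exact_matches := demo_find_players_by_name player_input mock_database 1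
  if !exact_matches.isEmpty && ((PySem.List.pyGet? exact_matches 0).getD ("", "")).2 == "exact" then
    [((PySem.List.pyGet? exact_matches 0).getD ("", "")).1]
  else
    let all_matches := demo_find_players_by_name player_input mock_database 10
    if all_matches.isEmpty then []
    else if all_matches.length == 1 then [((PySem.List.pyGet? all_matches 0).getD ("", "")).1]
    else all_matches.map (fun m => m.1)

-- ===== PORT B =====
def demo_expand_player_name_alt (player_input : String) (mock_database : List String) : List String :=
  let s := pyTitle (PySem.Str.strip player_input)
  let sl := PySem.Str.lower s
  match mock_database.find? (fun player => PySem.Str.lower player == sl) with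
  | some player => [player]
  | none =>
    let surnames :=
      if (PySem.Str.split₀ s).length == 1 then
        mock_database.filter (fun p => PySem.Str.lower ((PySem.List.pyGet? (PySem.Str.split₀ p) (-1)).getD "") == sl)
      else []
    let candidates := surnames ++ mock_database.filter (fun p => PySem.Str.isIn sl (PySem.Str.lower p))
    candidates.foldl (fun res name => if !res.contains name && decide (res.length < 10) then res ++ [name] else res) []

-- ===== PRECONDITION & SPEC =====
-- Pre_ excludes exactly the inputs where Python A raises IndexError (player.split()[-1] on an
-- all-whitespace database entry, reached only when the stripped input is a single word).
def Pre_demo_expand_player_name (player_input : String) (mock_database : List String) : Prop :=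
  ¬ ((PySem.Str.split₀ (PySem.Str.strip player_input)).length = 1 ∧
     ∃ p ∈ mock_database, PySem.Str.split₀ p = [])
instance (player_input : String) (mock_database : List String) : Decidable (Pre_demo_expand_player_name player_input mock_database) := by unfold Pre_demo_expand_player_name; infer_instance

def pvWitness_demo_expand_player_name : String × List String :=
  ("federer", ["Roger Federer", "Rafael Nadal"])

def Spec_demo_expand_player_name (player_input : String) (mock_database : List String) (out : List String) : Prop := out = demo_expand_player_name_alt player_input mock_database
instance (player_input : String) (mock_database : List String) (out : List String) : Decidable (Spec_demo_expand_player_name player_input mock_database out) := by unfold Spec_demo_expand_player_name; infer_instance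

-- ===== CLAIM (what is proved, stated in full; the proofs are below) =====
def Claim_equal_demo_expand_player_name : Prop := ∀ (player_input : String) (mock_database : List String), Dom_demo_expand_player_name player_input mock_database → Pre_demo_expand_player_name player_input mock_database → Spec_demo_expand_player_name player_input mock_database (demo_expand_player_name player_input mock_database)


-- ===== LEMMAS AND PROOFS =====

-- the two dedup-loop bodies, named for the proofs (same terms as in the ports)
def pvStepA (cap : Int) (st : List (String × String) × PySem.Set String × Bool) (m : String × String) :
    List (String × String) × PySem.Set String × Bool :=
  if st.2.2 then st
  else if !(PySem.Set.contains st.2.1 m.1) then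
    let u := st.1 ++ [m]
    (u, PySem.Set.add st.2.1 m.1, decide (cap ≤ (u.length : Int)))
  else st

def pvStepB (res : List String) (name : String) : List String :=
  if !res.contains name && decide (res.length < 10) then res ++ [name] else res

theorem pv_stepA_done (cap : Int) (u : List (String × String)) (s : PySem.Set String) (m : String × String) :
    pvStepA cap (u, s, true) m = (u, s, true) := by
  unfold pvStepA; dsimp only; simp

theorem pv_stepA_old (cap : Int) (u : List (String × String)) (s : PySem.Set String) (m : String × String)
    (h : PySem.Set.contains s m.1 = true) : pvStepA cap (u, s, false) m = (u, s, false) := by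
  unfold pvStepA; dsimp only; rw [h]; simp

theorem pv_stepA_new (cap : Int) (u : List (String × String)) (s : PySem.Set String) (m : String × String)
    (h : PySem.Set.contains s m.1 = false) :
    pvStepA cap (u, s, false) m
      = (u ++ [m], PySem.Set.add s m.1, decide (cap ≤ ((u ++ [m]).length : Int))) := by
  unfold pvStepA; dsimp only; rw [h]; simp

theorem pv_stepB_full (res : List String) (name : String) (h : decide (res.length < 10) = false) :
    pvStepB res name = res := by
  have h' : ¬ res.length < 10 := by simpa using h
  simp [pvStepB]
  intro _
  omega

theorem pv_stepB_old (res : List String) (name : String) (h : res.contains name = true) :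
    pvStepB res name = res := by
  have h' : name ∈ res := by simpa using h
  simp [pvStepB, h']

theorem pv_stepB_new (res : List String) (name : String) (h1 : res.contains name = false)
    (h2 : decide (res.length < 10) = true) : pvStepB res name = res ++ [name] := by
  have h1' : name ∉ res := by simpa using h1
  have h2' : res.length < 10 := by simpa using h2
  simp [pvStepB, h1', h2']

-- strip is idempotent (A strips its input twice, B once)
theorem pv_dropWhile_prefix {p : Char → Bool} {z y : List Char}
    (hzy : z <+: y) (hy : y.dropWhile p = y) : z.dropWhile p = z := by
  cases z with
  | nil => simp
  | cons c z' =>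
    obtain ⟨t, rfl⟩ := hzy
    simp only [List.cons_append] at hy
    by_cases hc : p c = true
    · exfalso
      have h1 := List.dropWhile_cons (p := p) (x := c) (xs := z' ++ t)
      rw [hc] at h1
      simp only [if_pos] at h1
      have hlen := congrArg List.length hy
      rw [h1] at hlen
      have hle := List.length_dropWhile_le (p := p) (l := z' ++ t)
      simp only [List.length_cons] at hlen
      omega
    · rw [List.dropWhile_cons, if_neg (by simp [hc])]

theorem pv_strip_idem (l : List Char) : PySem.Chars.strip (PySem.Chars.strip l) = PySem.Chars.strip l := by
  unfold PySem.Chars.strip PySem.Chars.rstrip PySem.Chars.lstrip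
  set p := PySem.Chars.isspace
  set y := l.dropWhile p with hydef
  have hyy : y.dropWhile p = y := by rw [hydef]; exact List.dropWhile_idempotent p l
  have hpref : ((y.reverse.dropWhile p).reverse) <+: y := by
    have h1 : (y.reverse.dropWhile p) <:+ y.reverse := List.dropWhile_suffix _
    have h2 := List.reverse_prefix.mpr (by simpa using h1)
    simpa using h2
  rw [pv_dropWhile_prefix hpref hyy, List.reverse_reverse, List.dropWhile_idempotent]

theorem pv_strip_idem_str (s : String) :
    PySem.Str.strip (PySem.Str.strip s) = PySem.Str.strip s := by
  simp [PySem.Str.strip, pv_strip_idem]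

-- A's final branching collapses to 'map fst' of the dedup result
theorem pv_tail_branches (l : List (String × String)) :
    (if l.isEmpty then ([] : List String)
     else if l.length == 1 then [((PySem.List.pyGet? l 0).getD ("", "")).1]
     else l.map (fun m => m.1)) = l.map (fun m => m.1) := by
  match l with
  | [] => simp
  | [x] => simp [PySem.List.pyGet?, PySem.List.pyIdx?]
  | x :: y :: t => simp

-- A's dedup loop saturates once the break flag is set
theorem pv_dedupA_done (l : List (String × String)) (u : List (String × String)) (s : PySem.Set String) (cap : Int) :
    l.foldl (pvStepA cap) (u, s, true) = (u, s, true) := by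
  induction l with
  | nil => rfl
  | cons m t ih => rw [List.foldl_cons, pv_stepA_done]; exact ih

-- with cap 1, A's dedup returns the first element
theorem pv_dedupA_one (m : String × String) (t : List (String × String)) :
    ((m :: t).foldl (pvStepA 1) ([], PySem.Set.empty, false)).1 = [m] := by
  rw [List.foldl_cons, pv_stepA_new 1 [] PySem.Set.empty m (by rfl)]
  have h1 : decide ((1 : Int) ≤ ((([] : List (String × String)) ++ [m]).length : Int)) = true := by simp
  rw [h1]
  have h0 : (([] : List (String × String)) ++ [m], PySem.Set.add (PySem.Set.empty : PySem.Set String) m.1, true)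
      = ([m], ([m.1] : PySem.Set String), true) := by simp [PySem.Set.empty, PySem.Set.add, PySem.Set.contains]
  rw [h0, pv_dedupA_done]

-- A's dedup (names via map fst) equals B's dedup, in lockstep
theorem pv_dedup_AB (l : List (String × String)) (u : List (String × String)) (hu : u.length ≤ 10) :
    ((l.foldl (pvStepA 10) (u, (u.map Prod.fst : PySem.Set String), decide ((10 : Int) ≤ (u.length : Int)))).1).map Prod.fst
    = (l.map Prod.fst).foldl pvStepB (u.map Prod.fst) := by
  induction l generalizing u with
  | nil => simp
  | cons m t ih =>
    rw [List.map_cons, List.foldl_cons, List.foldl_cons]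
    by_cases hlen : 10 ≤ u.length
    · have hA : decide ((10 : Int) ≤ ((u.length : Nat) : Int)) = true := by
        simp; omega
      have hB : decide ((u.map Prod.fst).length < 10) = false := by
        simp; omega
      rw [hA, pv_stepA_done, pv_stepB_full _ _ hB]
      have h := ih u hu
      rw [hA] at h
      exact h
    · have hA : decide ((10 : Int) ≤ ((u.length : Nat) : Int)) = false := by
        simp; omega
      rw [hA]
      have hB : decide ((u.map Prod.fst).length < 10) = true := by
        simp; omega
      by_cases hmem : (u.map Prod.fst).contains m.1 = true
      · rw [pv_stepA_old _ _ _ _ (by simpa [PySem.Set.contains] using hmem), pv_stepB_old _ _ hmem]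
        have h := ih u hu
        rw [hA] at h
        exact h
      · have hmem' : (u.map Prod.fst).contains m.1 = false := by simpa using hmem
        rw [pv_stepA_new _ _ _ _ (by simpa [PySem.Set.contains] using hmem'), pv_stepB_new _ _ hmem' hB]
        have hadd : PySem.Set.add ((u.map Prod.fst) : PySem.Set String) m.1 = (u ++ [m]).map Prod.fst := by
          have : PySem.Set.contains ((u.map Prod.fst) : PySem.Set String) m.1 = false := by
            simpa [PySem.Set.contains] using hmem'
          unfold PySem.Set.add
          rw [this]
          simp
        have hu' : (u ++ [m]).length ≤ 10 := by
          simp only [List.length_append, List.length_cons, List.length_nil]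
          omega
        have h := ih (u ++ [m]) hu'
        rw [hadd]
        have hfst : (u.map Prod.fst) ++ [m.1] = (u ++ [m]).map Prod.fst := by simp
        rw [hfst]
        exact h

-- starting from the empty state (the ports' literal initial state)
theorem pv_dedup_AB0 (l : List (String × String)) :
    ((l.foldl (pvStepA 10) ([], PySem.Set.empty, false)).1).map Prod.fst
    = (l.map Prod.fst).foldl pvStepB [] := by
  have h := pv_dedup_AB l [] (by simp)
  simpa [PySem.Set.empty] using h

-- demo_find_players_by_name, characterised: filters, then the dedup fold
theorem pv_find_characterize (q : String) (db : List String) (cap : Int) :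
    demo_find_players_by_name q db cap =
    ((((db.filter (fun p => PySem.Str.lower p == PySem.Str.lower (pyTitle (PySem.Str.strip q)))).map (fun p => (p, "exact"))
       ++ (if (PySem.Str.split₀ (pyTitle (PySem.Str.strip q))).length == 1 then
            (db.filter (fun p => PySem.Str.lower ((PySem.List.pyGet? (PySem.Str.split₀ p) (-1)).getD "") == PySem.Str.lower (pyTitle (PySem.Str.strip q)))).map (fun p => (p, "surname"))
          else [])
       ++ (db.filter (fun p => PySem.Str.isIn (PySem.Str.lower (pyTitle (PySem.Str.strip q))) (PySem.Str.lower p))).map (fun p => (p, "partial")))).foldl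
        (pvStepA cap) ([], PySem.Set.empty, false)).1 := by
  unfold demo_find_players_by_name
  rw [show (fun (st : List (String × String) × PySem.Set String × Bool) (m : String × String) =>
      if st.2.2 then st
      else if !(PySem.Set.contains st.2.1 m.1) then
        let u := st.1 ++ [m]
        (u, PySem.Set.add st.2.1 m.1, decide (cap ≤ (u.length : Int)))
      else st) = pvStepA cap from rfl]
  simp only [PySem.List.foldl_append_if]
  by_cases hc : ((PySem.Str.split₀ (pyTitle (PySem.Str.strip q))).length == 1) = true
  · simp [hc, List.foldl_append]
  · simp only [Bool.not_eq_true] at hc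
    simp [hc, List.foldl_append]

-- the surname/partial pool carries no "exact" tag
theorem pv_mem_tags (c : Bool) (S P : List String) :
    ∀ m ∈ ((if c = true then S.map (fun p => (p, "surname")) else [])
            ++ P.map (fun p => (p, "partial"))),
      (m.2 == "exact") = false := by
  intro m hm
  rcases List.mem_append.mp hm with h | h
  · cases c with
    | true =>
      simp only [if_pos] at h
      obtain ⟨x, _, rfl⟩ := List.mem_map.mp h
      rfl
    | false => simp at h
  · obtain ⟨x, _, rfl⟩ := List.mem_map.mp h
    rfl

-- candidate names are the pool's first components
theorem pv_names (c : Bool) (S P : List String) :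
    ((if c = true then S.map (fun p => (p, "surname")) else [])
      ++ P.map (fun p => (p, "partial"))).map Prod.fst
    = (if c = true then S else []) ++ P := by
  cases c <;> simp [Function.comp_def]

-- with no exact match, A's whole tail equals B's dedup of the candidate names
theorem pv_noexact (M : List (String × String)) (h : ∀ m ∈ M, (m.2 == "exact") = false) :
    (if !(M.foldl (pvStepA 1) ([], PySem.Set.empty, false)).1.isEmpty &&
        ((PySem.List.pyGet? (M.foldl (pvStepA 1) ([], PySem.Set.empty, false)).1 0).getD ("", "")).2 == "exact" then
       [((PySem.List.pyGet? (M.foldl (pvStepA 1) ([], PySem.Set.empty, false)).1 0).getD ("", "")).1]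
     else if (M.foldl (pvStepA 10) ([], PySem.Set.empty, false)).1.isEmpty then []
     else if (M.foldl (pvStepA 10) ([], PySem.Set.empty, false)).1.length == 1 then
       [((PySem.List.pyGet? (M.foldl (pvStepA 10) ([], PySem.Set.empty, false)).1 0).getD ("", "")).1]
     else (M.foldl (pvStepA 10) ([], PySem.Set.empty, false)).1.map (fun m => m.1))
    = (M.map Prod.fst).foldl pvStepB [] := by
  cases M with
  | nil => simp [PySem.Set.empty]
  | cons m t =>
    rw [pv_dedupA_one]
    have hm := h m (List.mem_cons_self)
    have hcond : (!([(m : String × String)] : List (String × String)).isEmpty &&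
        ((PySem.List.pyGet? ([m] : List (String × String)) 0).getD ("", "")).2 == "exact") = false := by
      simp [PySem.List.pyGet?, PySem.List.pyIdx?, hm]
    rw [hcond]
    simp only [Bool.false_eq_true, if_false]
    rw [pv_tail_branches]
    exact pv_dedup_AB0 (m :: t)

-- ===== VERDICT (by name: the statement is the Claim_ definition above) =====
theorem demo_expand_player_name_spec : Claim_equal_demo_expand_player_name := by
  intro pi db _ _
  unfold Spec_demo_expand_player_name demo_expand_player_name demo_expand_player_name_alt
  dsimp only
  rw [pv_find_characterize, pv_find_characterize, pv_strip_idem_str]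
  rw [show (List.find? (fun player => PySem.Str.lower player == PySem.Str.lower (pyTitle (PySem.Str.strip pi))) db)
        = (List.filter (fun player => PySem.Str.lower player == PySem.Str.lower (pyTitle (PySem.Str.strip pi))) db).head?
      from by rw [List.head?_filter]]
  rw [show (fun (res : List String) (name : String) =>
        if !res.contains name && decide (res.length < 10) then res ++ [name] else res) = pvStepB from rfl]
  cases hE : List.filter (fun player => PySem.Str.lower player == PySem.Str.lower (pyTitle (PySem.Str.strip pi))) db with
  | cons p es =>
    simp only [List.head?_cons, List.map_cons, List.cons_append]
    rw [pv_dedupA_one]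
    rfl
  | nil =>
    rw [List.map_nil, List.nil_append, List.head?_nil]
    rw [← pv_names ((PySem.Str.split₀ (pyTitle (PySem.Str.strip pi))).length == 1)
          (List.filter (fun p => PySem.Str.lower ((PySem.List.pyGet? (PySem.Str.split₀ p) (-1)).getD "") == PySem.Str.lower (pyTitle (PySem.Str.strip pi))) db)
          (List.filter (fun p => PySem.Str.isIn (PySem.Str.lower (pyTitle (PySem.Str.strip pi))) (PySem.Str.lower p)) db)]
    exact pv_noexact _ (pv_mem_tags _ _ _)
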